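-- pv_equiv track=rewrite | github.com/ValerieBG/DartmouthCS1 | recitation/feb27.py | func7
-- ===== SOURCE A (Python) =====
-- def func7(glist, evens=0):
--     if evens > 2:
--         return True
--     if len(glist) == 0:
--         return False
--     i = glist[0]
--     l = glist[1:]
--     if i % 2 == 0:
--         evens += 1
--         return func7(l, evens)
--     else:
--         return func7(l, evens)
-- ===== SOURCE B (Python) =====
-- def func7(glist, evens=0):
--     return evens + sum(x % 2 == 0 for x in glist) > 2
-- ===== Notes on version B (the rewrite author's own statement) =====
-- stated objective: simpler
-- what changed: Replaces A's per-element recursion with early return by a single count of even elements compared against the threshold once (value-equivalent because extra evens past the third cannot flip the > 2 test).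
import Mathlib
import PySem

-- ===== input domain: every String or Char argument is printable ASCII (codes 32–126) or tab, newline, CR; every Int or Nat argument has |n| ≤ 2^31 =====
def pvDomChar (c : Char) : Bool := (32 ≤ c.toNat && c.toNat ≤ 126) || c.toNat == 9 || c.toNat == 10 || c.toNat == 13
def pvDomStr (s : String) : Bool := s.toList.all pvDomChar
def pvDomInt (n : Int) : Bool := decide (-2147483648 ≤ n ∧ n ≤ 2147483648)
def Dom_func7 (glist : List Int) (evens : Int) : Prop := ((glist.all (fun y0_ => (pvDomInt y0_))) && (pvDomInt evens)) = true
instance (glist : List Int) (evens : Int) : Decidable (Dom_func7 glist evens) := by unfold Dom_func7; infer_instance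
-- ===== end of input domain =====

-- B replaces A's recursion-with-early-return by one pass counting evens and a single threshold test (simpler; same values).

-- ===== PORT A =====
def func7 (glist : List Int) (evens : Int) : Bool :=
  if evens > 2 then true
  else match glist with
    | [] => false
    | i :: l =>
      if PySem.Int.mod i 2 == 0 then func7 l (evens + 1)
      else func7 l evens

-- ===== PORT B =====
def func7_alt (glist : List Int) (evens : Int) : Bool :=
  decide (evens + ((glist.countP (fun x => PySem.Int.mod x 2 == 0)) : Int) > 2)

-- ===== PRECONDITION & SPEC =====
def Spec_func7 (glist : List Int) (evens : Int) (out : Bool) : Prop := out = func7_alt glist evens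
instance (glist : List Int) (evens : Int) (out : Bool) : Decidable (Spec_func7 glist evens out) := by unfold Spec_func7; infer_instance

-- ===== CLAIM (what is proved, stated in full; the proofs are below) =====
def Claim_equal_func7 : Prop := ∀ (glist : List Int) (evens : Int), Dom_func7 glist evens → Spec_func7 glist evens (func7 glist evens)

-- ===== LEMMAS AND PROOFS =====
theorem func7_eq_count (glist : List Int) (evens : Int) :
    func7 glist evens = decide (evens + ((glist.countP (fun x => PySem.Int.mod x 2 == 0)) : Int) > 2) := by
  induction glist generalizing evens with
  | nil =>
    simp only [func7, List.countP_nil, Int.natCast_zero, add_zero]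
    by_cases h : evens > 2
    · rw [if_pos h]; exact (decide_eq_true h).symm
    · rw [if_neg h]; exact (decide_eq_false h).symm
  | cons i l ih =>
    by_cases h : evens > 2
    · have hc : (0:Int) ≤ (((i :: l).countP (fun x => PySem.Int.mod x 2 == 0) : Nat) : Int) :=
        Int.natCast_nonneg _
      rw [func7, if_pos h]
      have : evens + (((i :: l).countP (fun x => PySem.Int.mod x 2 == 0) : Nat) : Int) > 2 := by omega
      exact (decide_eq_true this).symm
    · rw [func7, if_neg h]
      by_cases he : (PySem.Int.mod i 2 == 0) = true
      · rw [if_pos he, ih, decide_eq_decide]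
        simp only [List.countP_cons, he, if_true]
        push_cast
        omega
      · rw [if_neg he, ih, decide_eq_decide]
        simp only [List.countP_cons, he, Bool.false_eq_true, if_false, add_zero]

-- ===== VERDICT (by name: the statement is the Claim_ definition above) =====
theorem func7_spec : Claim_equal_func7 := by
  intro glist evens _
  unfold Spec_func7 func7_alt
  exact func7_eq_count glist evens
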